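-- pv_equiv track=rewrite | github.com/bs-feng/GWU_NLP_2017Fall | hw2/BigramWordLangId-GT.py | good_turning_para
-- ===== SOURCE A (Python) =====
-- def good_turning_para(bigram):
--     n = 0
--     n_one = 0
--     for item in bigram:
--         n += bigram[item]
--         if(bigram[item] == 1):
--             n_one += 1
--     return n, n_one
-- ===== SOURCE B (Python) =====
-- def good_turning_para(bigram):
--     hist = {}
--     for v in bigram.values():
--         hist[v] = hist.get(v, 0) + 1
--     n = 0
--     for value, mult in hist.items():
--         n += value * mult
--     return n, hist.get(1, 0)
-- ===== Notes on version B (the rewrite author's own statement) =====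
-- stated objective: alternative
-- what changed: B builds a frequency-of-frequencies histogram (the Good-Turing N_c table) over the dict's values and reads both results off it (n as sum of value*multiplicity over distinct values, n_one as hist.get(1,0)), instead of A's single key-loop with per-key dict lookups accumulating two scalars.
import Mathlib
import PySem

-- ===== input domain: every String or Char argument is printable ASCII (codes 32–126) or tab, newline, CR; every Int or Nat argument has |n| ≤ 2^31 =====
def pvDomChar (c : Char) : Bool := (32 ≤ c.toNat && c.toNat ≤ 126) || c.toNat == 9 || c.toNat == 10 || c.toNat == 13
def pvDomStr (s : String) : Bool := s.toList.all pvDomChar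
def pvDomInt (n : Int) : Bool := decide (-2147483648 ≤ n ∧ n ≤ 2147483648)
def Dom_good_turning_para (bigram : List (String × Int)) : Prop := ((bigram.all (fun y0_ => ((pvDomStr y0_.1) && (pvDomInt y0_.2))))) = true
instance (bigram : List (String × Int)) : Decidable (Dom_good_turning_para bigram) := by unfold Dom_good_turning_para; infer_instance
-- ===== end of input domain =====

-- B computes (n, n_one) via a frequency-of-frequencies histogram over the dict's values
-- (the Good-Turing N_c table) instead of A's single key-loop accumulating two scalars: alternative decomposition.


-- ===== PORT A =====
-- 'for item in bigram' iterates the dict's keys; 'bigram[item]' is the lookup (always present).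
def good_turning_para (bigram : List (String × Int)) : Int × Int :=
  let r := bigram.foldl (fun (s : Int × Int) item =>
    let v := (PySem.Dict.mk bigram).getD item.1 0
    (s.1 + v, if v == 1 then s.2 + 1 else s.2)) (0, 0)
  (r.1, r.2)

-- ===== PORT B =====
def good_turning_para_alt (bigram : List (String × Int)) : Int × Int :=
  let hist := bigram.foldl (fun (d : PySem.Dict Int Int) p => d.modify p.2 0 (· + 1)) PySem.Dict.empty
  let n := hist.items.foldl (fun acc p => acc + p.1 * p.2) 0
  (n, hist.getD 1 0)

-- ===== PRECONDITION & SPEC =====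
-- Pre_ excludes association lists with duplicate keys: they do not represent a Python dict,
-- so A (whose argument IS a dict) never receives them.
def Pre_good_turning_para (bigram : List (String × Int)) : Prop := (bigram.map Prod.fst).Nodup
instance (bigram : List (String × Int)) : Decidable (Pre_good_turning_para bigram) := by unfold Pre_good_turning_para; infer_instance
def pvWitness_good_turning_para : (List (String × Int)) := [("ab", 1), ("bc", 2)]
def Spec_good_turning_para (bigram : List (String × Int)) (out : Int × Int) : Prop := out = good_turning_para_alt bigram
instance (bigram : List (String × Int)) (out : Int × Int) : Decidable (Spec_good_turning_para bigram out) := by unfold Spec_good_turning_para; infer_instance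

-- ===== CLAIM (what is proved, stated in full; the proofs are below) =====
def Claim_equal_good_turning_para : Prop := ∀ (bigram : List (String × Int)), Dom_good_turning_para bigram → Pre_good_turning_para bigram → Spec_good_turning_para bigram (good_turning_para bigram)

-- ===== LEMMAS AND PROOFS =====

-- A's fold, with each lookup replaced by the pair's own value, computes (sum, #ones).
theorem pvA_fold (l : List Int) (a b : Int) :
    l.foldl (fun (s : Int × Int) v => (s.1 + v, if v == 1 then s.2 + 1 else s.2)) (a, b)
      = (a + l.sum, b + (l.count 1 : Int)) := by
  induction l generalizing a b with
  | nil => simp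
  | cons x t ih =>
    simp only [List.foldl_cons, ih, List.sum_cons, List.count_cons]
    by_cases h : x = 1
    · simp [h, Prod.ext_iff]
      constructor
      · ring
      · ring
    · simp [h, Prod.ext_iff]
      ring

theorem pvFoldl_add_mul (l : List (Int × Int)) (a : Int) :
    l.foldl (fun acc p => acc + p.1 * p.2) a = a + (l.map (fun p => p.1 * p.2)).sum := by
  induction l generalizing a with
  | nil => simp
  | cons x t ih => simp [ih]; ring

theorem pvFilter_cons_sum (l : List Int) (k : Int) (d : List Int) (hk : k ∉ d) :
    (l.filter (fun x => decide (x = k) || decide (x ∈ d))).sum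
      = k * (l.count k : Int) + (l.filter (fun x => decide (x ∈ d))).sum := by
  induction l with
  | nil => simp
  | cons x t ih =>
    by_cases hx : x = k
    · subst hx
      have hxd : x ∉ d := hk
      simp [hxd, ih]
      ring
    · by_cases hd : x ∈ d
      · simp [hx, hd, ih]; ring
      · simp [hx, hd, ih]

theorem pvSum_mul_count (d : List Int) (l : List Int) (hd : d.Nodup) :
    (d.map (fun k => k * (l.count k : Int))).sum
      = (l.filter (fun x => decide (x ∈ d))).sum := by
  induction d with
  | nil => simp
  | cons k d' ih =>
    rcases List.nodup_cons.mp hd with ⟨hk, hd'⟩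
    have hpred : (l.filter (fun x => decide (x ∈ k :: d'))).sum
        = (l.filter (fun x => decide (x = k) || decide (x ∈ d'))).sum := by
      simp [List.mem_cons]
    rw [hpred, pvFilter_cons_sum l k d' hk, List.map_cons, List.sum_cons, ih hd']

theorem pvHist_sum (l : List Int) :
    ((PySem.Dict.counter l).items.map (fun p => p.1 * p.2)).sum = l.sum := by
  rw [PySem.Dict.items_counter, List.map_map]
  have h := pvSum_mul_count (PySem.Set.ofList l) l (PySem.Set.nodup_ofList l)
  have hfe : ((PySem.Set.ofList l).map ((fun p : Int × Int => p.1 * p.2) ∘ (fun k => (k, (l.count k : Int)))))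
      = (PySem.Set.ofList l).map (fun k => k * (l.count k : Int)) := by
    simp [Function.comp]
  rw [hfe, h]
  have : l.filter (fun x => decide (x ∈ PySem.Set.ofList l)) = l := by
    apply List.filter_eq_self.mpr
    intro a ha
    simp [PySem.Set.mem_ofList, ha]
  rw [this]

-- Under Nodup keys, each lookup in A's loop returns the pair's own value.
theorem pvA_lookup (bigram : List (String × Int)) (hnd : (bigram.map Prod.fst).Nodup)
    (p : String × Int) (hp : p ∈ bigram) :
    (PySem.Dict.mk bigram).getD p.1 0 = p.2 := by
  apply PySem.Dict.getD_of_mem_items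
  · simpa [PySem.Dict.items] using hp
  · simpa [PySem.Dict.keys] using hnd

-- ===== VERDICT (by name: the statement is the Claim_ definition above) =====
theorem good_turning_para_spec : Claim_equal_good_turning_para := by
  intro bigram _ hpre
  unfold Spec_good_turning_para good_turning_para good_turning_para_alt
  simp only []
  -- replace A's lookups by the pair values
  have hA : bigram.foldl (fun (s : Int × Int) item =>
      let v := (PySem.Dict.mk bigram).getD item.1 0
      (s.1 + v, if v == 1 then s.2 + 1 else s.2)) (0, 0)
      = bigram.foldl (fun (s : Int × Int) item =>
      (s.1 + item.2, if item.2 == 1 then s.2 + 1 else s.2)) (0, 0) := by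
    apply PySem.List.foldl_congr_mem
    intro s p hp
    simp only [pvA_lookup bigram hpre p hp]
  have hA2 : bigram.foldl (fun (s : Int × Int) item =>
      (s.1 + item.2, if item.2 == 1 then s.2 + 1 else s.2)) (0, 0)
      = (bigram.map Prod.snd).foldl (fun (s : Int × Int) v =>
      (s.1 + v, if v == 1 then s.2 + 1 else s.2)) (0, 0) := by
    rw [List.foldl_map]
  have hB : bigram.foldl (fun (d : PySem.Dict Int Int) p => d.modify p.2 0 (· + 1)) PySem.Dict.empty
      = PySem.Dict.counter (bigram.map Prod.snd) := by
    rw [PySem.Dict.counter_eq_foldl, List.foldl_map]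
  rw [hA, hA2, pvA_fold, hB, pvFoldl_add_mul, pvHist_sum,
      PySem.Dict.getD_counter]
  simp
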